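-- pv_equiv track=rewrite | github.com/Bhavana598/bee-breeding | bee breeding.py | precompute_coords
-- ===== SOURCE A (Python) =====
-- def precompute_coords(max_cell_num):
--     coords = {}
--     dirs = [(1, -1, 0), (0, -1, 1), (-1, 0, 1),
--             (-1, 1, 0), (0, 1, -1), (1, 0, -1)]
--
--     x = y = z = 0
--     coords[1] = (x, y, z)
--     cid = 1
--     ring = 0
--
--     while cid < max_cell_num:
--         ring += 1
--         dx, dy, dz = dirs[0]
--         x += dx
--         y += dy
--         z += dz
--         cid += 1
--         coords[cid] = (x, y, z)
--
--         for side in range(6):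
--             dir = dirs[(side + 1) % 6]
--             steps = ring if side > 0 else ring - 1
--             for _ in range(steps):
--                 if cid >= max_cell_num:
--                     return coords
--                 x += dir[0]
--                 y += dir[1]
--                 z += dir[2]
--                 cid += 1
--                 coords[cid] = (x, y, z)
--     return coords
-- ===== SOURCE B (Python) =====
-- def precompute_coords(max_cell_num):
--     # Closed-form: each cell's cube coordinate is computed directly from its
--     # ring r and offset j within the ring (no step-by-step walking).
--     dirs = [(1, -1, 0), (0, -1, 1), (-1, 0, 1),
--             (-1, 1, 0), (0, 1, -1), (1, 0, -1)]
--     coords = {1: (0, 0, 0)}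
--     r = 0
--     for cid in range(2, max_cell_num + 1):
--         if cid > 1 + 3 * r * (r + 1):
--             r += 1
--         j = cid - (2 + 3 * r * (r - 1))
--         c, s = divmod(j, r)
--         a = dirs[(c + 5) % 6]
--         b = dirs[(c + 1) % 6]
--         coords[cid] = (r * a[0] + (s + 1) * b[0],
--                        r * a[1] + (s + 1) * b[1],
--                        r * a[2] + (s + 1) * b[2])
--     return coords
-- ===== Notes on version B (the rewrite author's own statement) =====
-- stated objective: alternative
-- what changed: B replaces A's step-by-step hex-spiral walk (nested while/side/step loops accumulating x,y,z) by a single flat loop over cell ids that computes each cell's cube coordinate in closed form from its ring and offset (corner/edge vector decomposition).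
import Mathlib
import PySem

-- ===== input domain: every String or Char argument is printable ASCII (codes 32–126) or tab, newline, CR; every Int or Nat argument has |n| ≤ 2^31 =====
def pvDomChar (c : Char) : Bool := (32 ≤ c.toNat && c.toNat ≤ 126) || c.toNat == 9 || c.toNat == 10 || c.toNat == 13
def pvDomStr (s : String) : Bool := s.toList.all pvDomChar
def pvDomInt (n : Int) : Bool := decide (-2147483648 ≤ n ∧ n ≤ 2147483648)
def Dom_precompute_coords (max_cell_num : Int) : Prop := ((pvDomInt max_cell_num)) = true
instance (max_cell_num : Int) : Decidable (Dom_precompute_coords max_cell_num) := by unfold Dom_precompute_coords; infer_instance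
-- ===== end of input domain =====

-- B computes each cell's coordinate in closed form from ring and offset instead of
-- walking the spiral step by step (objective: alternative decomposition, same cost).

-- ===== PORT A =====
def pvDirsA : List (Int × Int × Int) :=
  [(1, -1, 0), (0, -1, 1), (-1, 0, 1), (-1, 1, 0), (0, 1, -1), (1, 0, -1)]

-- dirs[k]: the index is always in range (0 ≤ k < 6), so the .getD default is never used — exact.
def pvDirGetA (k : Int) : Int × Int × Int := (PySem.List.pyGet? pvDirsA k).getD (0, 0, 0)

-- inner `for _ in range(steps)` with its early `return coords` (.inr = early return)
def pvStepA (maxN : Int) (d : Int × Int × Int) :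
    Nat → PySem.Dict Int (Int × Int × Int) × Int × Int × Int × Int →
    (PySem.Dict Int (Int × Int × Int) × Int × Int × Int × Int) ⊕ PySem.Dict Int (Int × Int × Int)
  | 0, st => .inl st
  | n + 1, (coords, x, y, z, cid) =>
    if cid ≥ maxN then .inr coords
    else
      let x := x + d.1
      let y := y + d.2.1
      let z := z + d.2.2
      let cid := cid + 1
      pvStepA maxN d n (coords.insert cid (x, y, z), x, y, z, cid)

-- `for side in range(6)` loop body, threading the possible early return
def pvSidesA (maxN ring : Int) :
    List Int → PySem.Dict Int (Int × Int × Int) × Int × Int × Int × Int →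
    (PySem.Dict Int (Int × Int × Int) × Int × Int × Int × Int) ⊕ PySem.Dict Int (Int × Int × Int)
  | [], st => .inl st
  | side :: rest, st =>
    let dir := pvDirGetA (PySem.Int.mod (side + 1) 6)
    let steps : Int := if side > 0 then ring else ring - 1
    match pvStepA maxN dir steps.toNat st with
    | .inl st' => pvSidesA maxN ring rest st'
    | .inr c => .inr c

-- termination helpers for the outer while loop: cid never decreases
theorem pvStepA_cid_le (maxN : Int) (d : Int × Int × Int) :
    ∀ (n : Nat) st st', pvStepA maxN d n st = .inl st' → st.2.2.2.2 ≤ st'.2.2.2.2 := by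
  intro n
  induction n with
  | zero => intro st st' h; cases h; omega
  | succ n ih =>
    rintro ⟨coords, x, y, z, cid⟩ st' h
    simp only [pvStepA] at h
    split at h
    · cases h
    · have := ih _ _ h
      simp at this ⊢
      omega

theorem pvSidesA_cid_le (maxN ring : Int) :
    ∀ (sides : List Int) st st', pvSidesA maxN ring sides st = .inl st' → st.2.2.2.2 ≤ st'.2.2.2.2 := by
  intro sides
  induction sides with
  | nil => intro st st' h; cases h; omega
  | cons side rest ih =>
    intro st st' h
    simp only [pvSidesA] at h
    split at h
    next st'' heq =>
      have h1 := pvStepA_cid_le maxN _ _ _ _ heq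
      have h2 := ih _ _ h
      omega
    next => cases h

-- the outer `while cid < max_cell_num` loop
def pvWhileA (maxN : Int) (coords : PySem.Dict Int (Int × Int × Int)) (x y z cid ring : Int) :
    PySem.Dict Int (Int × Int × Int) :=
  if h : cid < maxN then
    let d0 := pvDirGetA 0
    let x' := x + d0.1
    let y' := y + d0.2.1
    let z' := z + d0.2.2
    let cid' := cid + 1
    let coords' := coords.insert cid' (x', y', z')
    match hm : pvSidesA maxN (ring + 1) (PySem.List.pyRange 0 6 1) (coords', x', y', z', cid') with
    | .inl (c2, x2, y2, z2, cid2) => pvWhileA maxN c2 x2 y2 z2 cid2 (ring + 1)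
    | .inr c => c
  else coords
termination_by (maxN - cid).toNat
decreasing_by
  have := pvSidesA_cid_le maxN (ring + 1) _ _ _ hm
  simp at this
  omega

def precompute_coords (max_cell_num : Int) : List (Int × Int × Int × Int) :=
  let coords : PySem.Dict Int (Int × Int × Int) := PySem.Dict.empty.insert 1 (0, 0, 0)
  (pvWhileA max_cell_num coords 0 0 0 1 0).items

-- ===== PORT B =====
def pvDirsB : List (Int × Int × Int) :=
  [(1, -1, 0), (0, -1, 1), (-1, 0, 1), (-1, 1, 0), (0, 1, -1), (1, 0, -1)]

-- dirs[k]: the index is always in range (0 ≤ k < 6), so the .getD default is never used — exact.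
def pvDirGetB (k : Int) : Int × Int × Int := (PySem.List.pyGet? pvDirsB k).getD (0, 0, 0)

def pvStepB (st : PySem.Dict Int (Int × Int × Int) × Int) (cid : Int) :
    PySem.Dict Int (Int × Int × Int) × Int :=
  let coords := st.1
  let r := if cid > 1 + 3 * st.2 * (st.2 + 1) then st.2 + 1 else st.2
  let j := cid - (2 + 3 * r * (r - 1))
  let c := PySem.Int.floordiv j r
  let s := PySem.Int.mod j r
  let a := pvDirGetB (PySem.Int.mod (c + 5) 6)
  let b := pvDirGetB (PySem.Int.mod (c + 1) 6)
  (coords.insert cid (r * a.1 + (s + 1) * b.1, r * a.2.1 + (s + 1) * b.2.1,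
      r * a.2.2 + (s + 1) * b.2.2), r)

def precompute_coords_alt (max_cell_num : Int) : List (Int × Int × Int × Int) :=
  let init : PySem.Dict Int (Int × Int × Int) × Int := (PySem.Dict.ofList [(1, (0, 0, 0))], 0)
  ((PySem.List.pyRange 2 (max_cell_num + 1) 1).foldl pvStepB init).1.items

-- ===== PRECONDITION & SPEC =====
def Spec_precompute_coords (max_cell_num : Int) (out : List (Int × Int × Int × Int)) : Prop := out = precompute_coords_alt max_cell_num
instance (max_cell_num : Int) (out : List (Int × Int × Int × Int)) : Decidable (Spec_precompute_coords max_cell_num out) := by unfold Spec_precompute_coords; infer_instance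

-- ===== CLAIM (what is proved, stated in full; the proofs are below) =====
def Claim_equal_precompute_coords : Prop := ∀ (max_cell_num : Int), Dom_precompute_coords max_cell_num → Spec_precompute_coords max_cell_num (precompute_coords max_cell_num)


-- ===== LEMMAS AND PROOFS =====

-- first cell of ring r (r ≥ 1)
def pvCS (r : Int) : Int := 2 + 3 * r * (r - 1)

-- closed-form position of the cell with offset j in ring r (exactly B's per-cell formula)
def pvPos (r j : Int) : Int × Int × Int :=
  let c := PySem.Int.floordiv j r
  let s := PySem.Int.mod j r
  let a := pvDirGetB (PySem.Int.mod (c + 5) 6)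
  let b := pvDirGetB (PySem.Int.mod (c + 1) 6)
  (r * a.1 + (s + 1) * b.1, r * a.2.1 + (s + 1) * b.2.1, r * a.2.2 + (s + 1) * b.2.2)

-- cells of ring r with offsets 0 .. t-1
def pvSeg (r : Int) (t : Nat) : List (Int × Int × Int × Int) :=
  (List.range t).map (fun (i : Nat) => (pvCS r + (i : Int), pvPos r (i : Int)))

-- offset (within ring r) of the cell at which side c starts
def pvOff (r c : Int) : Int := if c = 0 then 0 else c * r - 1

theorem pvInsertFresh (L : List (Int × Int × Int × Int)) (k : Int) (v : Int × Int × Int)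
    (h : ∀ p ∈ L, p.1 ≠ k) :
    (PySem.Dict.mk L).insert k v = PySem.Dict.mk (L ++ [(k, v)]) := by
  apply PySem.Dict.ext
  have hc : (PySem.Dict.mk L).contains k = false := by
    rw [← Bool.not_eq_true, PySem.Dict.contains_iff_mem_keys]
    simp only [PySem.Dict.keys, List.mem_map]
    rintro ⟨p, hp, hpk⟩
    exact h p hp hpk
  rw [PySem.Dict.items_insert_of_not_contains _ _ hc]

theorem pvPos_eq (r j c s : Int) (hr : 1 ≤ r) (hc0 : 0 ≤ c) (hc5 : c ≤ 5)
    (hs0 : 0 ≤ s) (hs : s < r) (hj : j = c * r + s) :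
    pvPos r j =
      (if c = 0 then (r, -1 - s, 1 - r + s)
       else if c = 1 then (r - 1 - s, -r, 1 + s)
       else if c = 2 then (-1 - s, 1 - r + s, r)
       else if c = 3 then (-r, 1 + s, r - 1 - s)
       else if c = 4 then (1 - r + s, r, -1 - s)
       else (1 + s, r - 1 - s, -r)) := by
  have hdiv : PySem.Int.floordiv j r = c := by
    rw [PySem.Int.floordiv_eq_iff_of_pos (by omega)]
    constructor <;> nlinarith
  have hmod : PySem.Int.mod j r = s := by
    have h2 := PySem.Int.floordiv_mul_add_mod j r
    rw [hdiv] at h2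
    omega
  simp only [pvPos, hdiv, hmod]
  have d0 : pvDirGetB 0 = (1, -1, 0) := by decide
  have d1 : pvDirGetB 1 = (0, -1, 1) := by decide
  have d2 : pvDirGetB 2 = (-1, 0, 1) := by decide
  have d3 : pvDirGetB 3 = (-1, 1, 0) := by decide
  have d4 : pvDirGetB 4 = (0, 1, -1) := by decide
  have d5 : pvDirGetB 5 = (1, 0, -1) := by decide
  interval_cases c <;> norm_num [d0, d1, d2, d3, d4, d5] <;> omega

theorem pvPos_step (r c i : Int) (hr : 1 ≤ r) (hc0 : 0 ≤ c) (hc5 : c ≤ 5)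
    (hi0 : 0 ≤ i) (hi : i ≤ (if c > 0 then r else r - 1)) :
    pvPos r (pvOff r c + i) =
      ((pvPos r (pvOff r c)).1 + i * (pvDirGetA (PySem.Int.mod (c + 1) 6)).1,
       (pvPos r (pvOff r c)).2.1 + i * (pvDirGetA (PySem.Int.mod (c + 1) 6)).2.1,
       (pvPos r (pvOff r c)).2.2 + i * (pvDirGetA (PySem.Int.mod (c + 1) 6)).2.2) := by
  have a1 : pvDirGetA (PySem.Int.mod (0 + 1) 6) = (0, -1, 1) := by decide
  have a2 : pvDirGetA (PySem.Int.mod (1 + 1) 6) = (-1, 0, 1) := by decide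
  have a3 : pvDirGetA (PySem.Int.mod (2 + 1) 6) = (-1, 1, 0) := by decide
  have a4 : pvDirGetA (PySem.Int.mod (3 + 1) 6) = (0, 1, -1) := by decide
  have a5 : pvDirGetA (PySem.Int.mod (4 + 1) 6) = (1, 0, -1) := by decide
  have a6 : pvDirGetA (PySem.Int.mod (5 + 1) 6) = (1, -1, 0) := by decide
  interval_cases c
  · -- c = 0 : side 0, i ≤ r - 1
    simp only [show (0:Int) > 0 ↔ False from by norm_num, if_false] at hi
    have hstart := pvPos_eq r (pvOff r 0) 0 0 hr (by norm_num) (by norm_num) (by norm_num)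
      (by omega) (by simp [pvOff])
    have htgt := pvPos_eq r (pvOff r 0 + i) 0 i hr (by norm_num) (by norm_num) hi0
      (by omega) (by simp [pvOff])
    rw [htgt, hstart, a1]
    norm_num [Prod.mk.injEq]
    try omega
  all_goals (simp only [show ((1:Int) > 0) = True from by norm_num,
      show ((2:Int) > 0) = True from by norm_num, show ((3:Int) > 0) = True from by norm_num,
      show ((4:Int) > 0) = True from by norm_num, show ((5:Int) > 0) = True from by norm_num,
      if_true] at hi)
  · have hstart := pvPos_eq r (pvOff r 1) 0 (r - 1) hr (by norm_num) (by norm_num) (by omega)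
      (by omega) (by simp [pvOff]; try ring; try omega)
    rcases eq_or_lt_of_le hi0 with h0 | h0
    · rw [← h0]; simp
    have htgt := pvPos_eq r (pvOff r 1 + i) 1 (i - 1) hr (by norm_num) (by norm_num) (by omega)
      (by omega) (by simp [pvOff]; try ring; try omega)
    rw [htgt, hstart, a2]
    norm_num [Prod.mk.injEq]
    try omega
  · have hstart := pvPos_eq r (pvOff r 2) 1 (r - 1) hr (by norm_num) (by norm_num) (by omega)
      (by omega) (by simp [pvOff]; try ring; try omega)
    rcases eq_or_lt_of_le hi0 with h0 | h0
    · rw [← h0]; simp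
    have htgt := pvPos_eq r (pvOff r 2 + i) 2 (i - 1) hr (by norm_num) (by norm_num) (by omega)
      (by omega) (by simp [pvOff]; try ring; try omega)
    rw [htgt, hstart, a3]
    norm_num [Prod.mk.injEq]
    try omega
  · have hstart := pvPos_eq r (pvOff r 3) 2 (r - 1) hr (by norm_num) (by norm_num) (by omega)
      (by omega) (by simp [pvOff]; try ring; try omega)
    rcases eq_or_lt_of_le hi0 with h0 | h0
    · rw [← h0]; simp
    have htgt := pvPos_eq r (pvOff r 3 + i) 3 (i - 1) hr (by norm_num) (by norm_num) (by omega)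
      (by omega) (by simp [pvOff]; try ring; try omega)
    rw [htgt, hstart, a4]
    norm_num [Prod.mk.injEq]
    try omega
  · have hstart := pvPos_eq r (pvOff r 4) 3 (r - 1) hr (by norm_num) (by norm_num) (by omega)
      (by omega) (by simp [pvOff]; try ring; try omega)
    rcases eq_or_lt_of_le hi0 with h0 | h0
    · rw [← h0]; simp
    have htgt := pvPos_eq r (pvOff r 4 + i) 4 (i - 1) hr (by norm_num) (by norm_num) (by omega)
      (by omega) (by simp [pvOff]; try ring; try omega)
    rw [htgt, hstart, a5]
    norm_num [Prod.mk.injEq]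
    try omega
  · have hstart := pvPos_eq r (pvOff r 5) 4 (r - 1) hr (by norm_num) (by norm_num) (by omega)
      (by omega) (by simp [pvOff]; try ring; try omega)
    rcases eq_or_lt_of_le hi0 with h0 | h0
    · rw [← h0]; simp
    have htgt := pvPos_eq r (pvOff r 5 + i) 5 (i - 1) hr (by norm_num) (by norm_num) (by omega)
      (by omega) (by simp [pvOff]; try ring; try omega)
    rw [htgt, hstart, a6]
    norm_num [Prod.mk.injEq]
    try omega

theorem pvSeg_extend (r : Int) (t n : Nat) (f : Nat → Int × Int × Int × Int)
    (hf : ∀ i < n, f i = (pvCS r + ((t + i : Nat) : Int), pvPos r ((t + i : Nat) : Int))) :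
    pvSeg r t ++ (List.range n).map f = pvSeg r (t + n) := by
  unfold pvSeg
  rw [List.range_add, List.map_append, List.map_map]
  congr 1
  refine List.map_congr_left ?_
  intro i hi
  rw [List.mem_range] at hi
  simp only [Function.comp_apply]
  rw [hf i hi]

theorem pvSeg_mem (r : Int) (t : Nat) : ∀ p ∈ pvSeg r t, pvCS r ≤ p.1 ∧ p.1 < pvCS r + t := by
  intro p hp
  unfold pvSeg at hp
  rw [List.mem_map] at hp
  obtain ⟨i, hi, rfl⟩ := hp
  rw [List.mem_range] at hi
  constructor <;> simp <;> omega

theorem pvStepA_full (maxN : Int) (d : Int × Int × Int) :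
    ∀ (n : Nat) (L : List (Int × Int × Int × Int)) (x y z cid : Int),
      (∀ p ∈ L, p.1 ≤ cid) → cid + n ≤ maxN →
      pvStepA maxN d n (PySem.Dict.mk L, x, y, z, cid) =
        .inl (PySem.Dict.mk (L ++ (List.range n).map (fun (i : Nat) =>
                (cid + (i : Int) + 1, (x + ((i : Int) + 1) * d.1, y + ((i : Int) + 1) * d.2.1,
                 z + ((i : Int) + 1) * d.2.2)))),
              x + n * d.1, y + n * d.2.1, z + n * d.2.2, cid + n) := by
  intro n
  induction n with
  | zero =>
    intro L x y z cid hk hfit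
    simp [pvStepA]
  | succ n ih =>
    intro L x y z cid hk hfit
    simp only [pvStepA]
    rw [if_neg (by omega)]
    rw [pvInsertFresh L (cid + 1) (x + d.1, y + d.2.1, z + d.2.2)
      (fun p hp => by have := hk p hp; omega)]
    rw [ih (L ++ [(cid + 1, (x + d.1, y + d.2.1, z + d.2.2))]) (x + d.1) (y + d.2.1) (z + d.2.2)
      (cid + 1)
      (by intro p hp
          rcases List.mem_append.mp hp with h | h
          · have := hk p h; omega
          · rw [List.mem_singleton] at h; subst h; simp)
      (by omega)]
    simp only [Sum.inl.injEq, Prod.mk.injEq]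
    refine ⟨?_, by push_cast; ring, by push_cast; ring, by push_cast; ring, by omega⟩
    congr 1
    rw [List.append_assoc]
    congr 1
    rw [List.range_succ_eq_map, List.map_cons, List.map_map, List.singleton_append]
    congr 1
    · norm_num
    refine List.map_congr_left ?_
    intro i hi
    simp only [Function.comp_apply, Prod.mk.injEq]
    push_cast
    exact ⟨by ring, by ring, by ring, by ring⟩

theorem pvStepA_trunc (maxN : Int) (d : Int × Int × Int) :
    ∀ (n : Nat) (L : List (Int × Int × Int × Int)) (x y z cid : Int),
      (∀ p ∈ L, p.1 ≤ cid) → cid ≤ maxN → maxN < cid + n →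
      pvStepA maxN d n (PySem.Dict.mk L, x, y, z, cid) =
        .inr (PySem.Dict.mk (L ++ (List.range (maxN - cid).toNat).map (fun (i : Nat) =>
                (cid + (i : Int) + 1, (x + ((i : Int) + 1) * d.1, y + ((i : Int) + 1) * d.2.1,
                 z + ((i : Int) + 1) * d.2.2))))) := by
  intro n
  induction n with
  | zero =>
    intro L x y z cid hk h1 h2
    omega
  | succ n ih =>
    intro L x y z cid hk h1 h2
    simp only [pvStepA]
    by_cases hge : cid ≥ maxN
    · rw [if_pos hge]
      have : (maxN - cid).toNat = 0 := by omega
      rw [this]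
      simp
    · rw [if_neg hge]
      rw [pvInsertFresh L (cid + 1) (x + d.1, y + d.2.1, z + d.2.2)
        (fun p hp => by have := hk p hp; omega)]
      rw [ih (L ++ [(cid + 1, (x + d.1, y + d.2.1, z + d.2.2))]) (x + d.1) (y + d.2.1) (z + d.2.2)
        (cid + 1)
        (by intro p hp
            rcases List.mem_append.mp hp with h | h
            · have := hk p h; omega
            · rw [List.mem_singleton] at h; subst h; simp)
        (by omega) (by omega)]
      simp only [Sum.inr.injEq]
      congr 1
      rw [List.append_assoc]
      congr 1
      have hnat : (maxN - cid).toNat = (maxN - (cid + 1)).toNat + 1 := by omega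
      rw [hnat, List.range_succ_eq_map, List.map_cons, List.map_map, List.singleton_append]
      congr 1
      · norm_num
      refine List.map_congr_left ?_
      intro i hi
      simp only [Function.comp_apply, Prod.mk.injEq]
      push_cast
      exact ⟨by ring, by ring, by ring, by ring⟩

theorem pvOff_nonneg (r c : Int) (hr : 1 ≤ r) (hc : 0 ≤ c) : 0 ≤ pvOff r c := by
  unfold pvOff
  split_ifs with h
  · omega
  · have hc1 : 1 ≤ c := by omega
    nlinarith

theorem pvOff_succ (r c : Int) (hr : 1 ≤ r) (hc : 0 ≤ c) :
    pvOff r (c + 1) = pvOff r c + (if c > 0 then r else r - 1) := by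
  unfold pvOff
  split_ifs with h1 h2 h3 <;> first | omega | nlinarith | ring

theorem pvOff_le (r c : Int) (hr : 1 ≤ r) (hc : 0 ≤ c) (hc6 : c ≤ 6) :
    pvOff r c ≤ 6 * r - 1 := by
  unfold pvOff
  split_ifs with h
  · omega
  · nlinarith

theorem pvSidesA_run (maxN r : Int) (hr : 1 ≤ r) (base : List (Int × Int × Int × Int))
    (hbase : ∀ p ∈ base, p.1 < pvCS r) :
    ∀ (k : Nat) (c : Int), 0 ≤ c → c + k = 6 → pvCS r + pvOff r c ≤ maxN →
      pvSidesA maxN r (PySem.List.pyRange c 6 1)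
        (PySem.Dict.mk (base ++ pvSeg r (pvOff r c + 1).toNat),
         (pvPos r (pvOff r c)).1, (pvPos r (pvOff r c)).2.1, (pvPos r (pvOff r c)).2.2,
         pvCS r + pvOff r c) =
      if pvCS r + 6 * r - 1 ≤ maxN then
        .inl (PySem.Dict.mk (base ++ pvSeg r (6 * r).toNat),
              (pvPos r (6 * r - 1)).1, (pvPos r (6 * r - 1)).2.1, (pvPos r (6 * r - 1)).2.2,
              pvCS r + 6 * r - 1)
      else .inr (PySem.Dict.mk (base ++ pvSeg r ((maxN - pvCS r).toNat + 1))) := by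
  intro k
  induction k with
  | zero =>
    intro c hc0 hck hentry
    have hc6 : c = 6 := by omega
    subst hc6
    have hoff : pvOff r 6 = 6 * r - 1 := by simp [pvOff]
    rw [PySem.List.pyRange_one_eq_nil (by norm_num)]
    simp only [pvSidesA]
    rw [if_pos (by omega)]
    rw [hoff]
    rw [show (6 * r - 1 + 1 : Int) = 6 * r from by ring,
        show pvCS r + (6 * r - 1) = pvCS r + 6 * r - 1 from by ring]
  | succ k ih =>
    intro c hc0 hck hentry
    have hc5 : c ≤ 5 := by omega
    have hoffpos := pvOff_nonneg r c hr hc0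
    have hkeys : ∀ p ∈ base ++ pvSeg r (pvOff r c + 1).toNat, p.1 ≤ pvCS r + pvOff r c := by
      intro p hp
      rcases List.mem_append.mp hp with h | h
      · have := hbase p h; omega
      · have := pvSeg_mem r _ p h; omega
    rw [PySem.List.pyRange_one_cons (by omega)]
    simp only [pvSidesA]
    obtain ⟨stp, hstp⟩ : ∃ stp : Int, (if c > 0 then r else r - 1) = stp := ⟨_, rfl⟩
    rw [hstp]
    have hoffsucc : pvOff r (c + 1) = pvOff r c + stp := by
      rw [pvOff_succ r c hr hc0, hstp]
    have hoffle := pvOff_le r (c + 1) hr (by omega) (by omega)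
    have hstep0 : (0 : Int) ≤ stp := by rw [← hstp]; split_ifs <;> omega
    by_cases hfit : pvCS r + pvOff r (c + 1) ≤ maxN
    · -- this whole side fits: run it fully, then continue with side c+1
      rw [pvStepA_full maxN (pvDirGetA (PySem.Int.mod (c + 1) 6))
            stp.toNat _ _ _ _ _ hkeys (by omega)]
      have hseg : (base ++ pvSeg r (pvOff r c + 1).toNat) ++
          (List.range stp.toNat).map (fun (i : Nat) =>
            (pvCS r + pvOff r c + (i : Int) + 1,
             ((pvPos r (pvOff r c)).1 + ((i : Int) + 1) * (pvDirGetA (PySem.Int.mod (c + 1) 6)).1,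
              (pvPos r (pvOff r c)).2.1 + ((i : Int) + 1) * (pvDirGetA (PySem.Int.mod (c + 1) 6)).2.1,
              (pvPos r (pvOff r c)).2.2 + ((i : Int) + 1) * (pvDirGetA (PySem.Int.mod (c + 1) 6)).2.2))) =
          base ++ pvSeg r (pvOff r (c + 1) + 1).toNat := by
        rw [List.append_assoc]
        congr 1
        rw [pvSeg_extend r _ _ _ ?hf]
        · congr 1
          omega
        case hf =>
          intro i hi
          have hi1 : (i : Int) + 1 ≤ stp := by omega
          have := pvPos_step r c ((i : Int) + 1) hr hc0 hc5 (by omega) (by rw [hstp]; exact hi1)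
          simp only [Prod.mk.injEq]
          refine ⟨by push_cast; omega, ?_⟩
          rw [show ((pvOff r c + 1).toNat + i : Nat) = ((pvOff r c + (i + 1)).toNat) from by omega]
          rw [show (((pvOff r c + (i + 1)).toNat : Nat) : Int) = pvOff r c + ((i : Int) + 1) from by omega]
          rw [this]
      rw [hseg]
      have hpos := pvPos_step r c stp hr hc0 hc5 hstep0 (by rw [← hstp])
      rw [show ((stp.toNat : Int)) = stp from by omega]
      rw [← hoffsucc] at hpos
      rw [show (pvPos r (pvOff r c)).1 + stp * (pvDirGetA (PySem.Int.mod (c + 1) 6)).1 = (pvPos r (pvOff r (c + 1))).1 from by rw [hpos]]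
      rw [show (pvPos r (pvOff r c)).2.1 + stp * (pvDirGetA (PySem.Int.mod (c + 1) 6)).2.1 = (pvPos r (pvOff r (c + 1))).2.1 from by rw [hpos]]
      rw [show (pvPos r (pvOff r c)).2.2 + stp * (pvDirGetA (PySem.Int.mod (c + 1) 6)).2.2 = (pvPos r (pvOff r (c + 1))).2.2 from by rw [hpos]]
      rw [show pvCS r + pvOff r c + stp = pvCS r + pvOff r (c + 1) from by omega]
      exact ih (c + 1) (by omega) (by omega) hfit
    · -- the run stops inside this side
      rw [pvStepA_trunc maxN (pvDirGetA (PySem.Int.mod (c + 1) 6))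
            stp.toNat _ _ _ _ _ hkeys hentry (by omega)]
      rw [if_neg (by omega)]
      show Sum.inr _ = Sum.inr _
      congr 1
      rw [List.append_assoc]
      congr 1
      rw [pvSeg_extend r _ _ _ ?hf2]
      · rw [show ((pvOff r c + 1).toNat + (maxN - (pvCS r + pvOff r c)).toNat : Nat) =
            ((maxN - pvCS r).toNat + 1 : Nat) from by omega]
      case hf2 =>
        intro i hi
        have hi1 : (i : Int) + 1 ≤ stp := by omega
        have := pvPos_step r c ((i : Int) + 1) hr hc0 hc5 (by omega) (by rw [hstp]; exact hi1)
        simp only [Prod.mk.injEq]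
        refine ⟨by push_cast; omega, ?_⟩
        rw [show ((pvOff r c + 1).toNat + i : Nat) = ((pvOff r c + (i + 1)).toNat) from by omega]
        rw [show (((pvOff r c + (i + 1)).toNat : Nat) : Int) = pvOff r c + ((i : Int) + 1) from by omega]
        rw [this]

theorem pvMap_pyRange_seg (r : Int) (K : Int) :
    (PySem.List.pyRange (pvCS r) K 1).map (fun cid => (cid, pvPos r (cid - pvCS r))) =
      pvSeg r ((K - pvCS r).toNat) := by
  rw [PySem.List.pyRange_one, List.map_map]
  unfold pvSeg
  refine List.map_congr_left ?_
  intro i _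
  simp only [Function.comp_apply]
  rw [show pvCS r + (i : Int) - pvCS r = (i : Int) from by ring]

theorem pvB_rest (r : Int) (hr : 1 ≤ r) :
    ∀ (n : Nat) (m K : Int) (L : List (Int × Int × Int × Int)),
      pvCS r < m → K ≤ pvCS (r + 1) → (∀ p ∈ L, p.1 < m) → (K - m).toNat ≤ n →
      (PySem.List.pyRange m K 1).foldl pvStepB (PySem.Dict.mk L, r) =
        (PySem.Dict.mk (L ++ (PySem.List.pyRange m K 1).map (fun cid =>
            (cid, pvPos r (cid - pvCS r)))), r) := by
  intro n
  induction n with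
  | zero =>
    intro m K L h1 h2 h3 h4
    rw [PySem.List.pyRange_one_eq_nil (by omega)]
    simp
  | succ n ih =>
    intro m K L h1 h2 h3 h4
    by_cases hmK : K ≤ m
    · rw [PySem.List.pyRange_one_eq_nil hmK]
      simp
    · rw [PySem.List.pyRange_one_cons (by omega)]
      simp only [List.foldl_cons, List.map_cons]
      have hstep : pvStepB (PySem.Dict.mk L, r) m =
          (PySem.Dict.mk (L ++ [(m, pvPos r (m - pvCS r))]), r) := by
        simp only [pvStepB]
        rw [if_neg (by unfold pvCS at h2; push_neg; nlinarith)]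
        rw [pvInsertFresh L m _ (fun p hp => by have := h3 p hp; omega)]
        simp only [pvPos, pvCS]
      rw [hstep]
      rw [ih (m + 1) K (L ++ [(m, pvPos r (m - pvCS r))]) (by omega) h2
        (by intro p hp
            rcases List.mem_append.mp hp with h | h
            · have := h3 p h; omega
            · rw [List.mem_singleton] at h; subst h; simp)
        (by omega)]
      rw [List.append_assoc, List.singleton_append]

theorem pvB_ring (r : Int) (hr : 1 ≤ r) (K : Int) (hK1 : pvCS r < K) (hK2 : K ≤ pvCS (r + 1))
    (L : List (Int × Int × Int × Int)) (hL : ∀ p ∈ L, p.1 < pvCS r) :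
    (PySem.List.pyRange (pvCS r) K 1).foldl pvStepB (PySem.Dict.mk L, r - 1) =
      (PySem.Dict.mk (L ++ pvSeg r ((K - pvCS r).toNat)), r) := by
  rw [PySem.List.pyRange_one_cons hK1]
  simp only [List.foldl_cons]
  have hstep1 : pvStepB (PySem.Dict.mk L, r - 1) (pvCS r) =
      (PySem.Dict.mk (L ++ [(pvCS r, pvPos r 0)]), r) := by
    simp only [pvStepB]
    rw [if_pos (by unfold pvCS; nlinarith)]
    rw [show (r - 1 + 1 : Int) = r from by ring]
    rw [pvInsertFresh L (pvCS r) _ (fun p hp => by have := hL p hp; omega)]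
    rw [show pvCS r - (2 + 3 * r * (r - 1)) = (0 : Int) from by unfold pvCS; ring]
    simp only [pvPos]
  rw [hstep1]
  have hmap := pvMap_pyRange_seg r K
  rw [PySem.List.pyRange_one_cons hK1, List.map_cons,
    show pvCS r - pvCS r = (0 : Int) from by ring] at hmap
  rw [pvB_rest r hr ((K - (pvCS r + 1)).toNat) (pvCS r + 1) K
    (L ++ [(pvCS r, pvPos r 0)]) (by omega) hK2
    (by intro p hp
        rcases List.mem_append.mp hp with h | h
        · have := hL p h; omega
        · rw [List.mem_singleton] at h; subst h; simp)
    (by omega)]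
  rw [List.append_assoc, List.singleton_append, hmap]

theorem pvCS_succ (r : Int) : pvCS (r + 1) = pvCS r + 6 * r := by unfold pvCS; ring

theorem pvPos_zero (r : Int) (hr : 1 ≤ r) : pvPos r 0 = (r, -1, 1 - r) := by
  have := pvPos_eq r 0 0 0 hr (by norm_num) (by norm_num) (by norm_num) (by omega) (by ring)
  simpa using this

theorem pvPos_end (r : Int) (hr : 1 ≤ r) : pvPos r (6 * r - 1) = (r, 0, -r) := by
  have := pvPos_eq r (6 * r - 1) 5 (r - 1) hr (by norm_num) (by norm_num) (by omega) (by omega)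
    (by ring)
  rw [this]
  norm_num [Prod.mk.injEq]
  all_goals omega

theorem pvWhileA_run (maxN : Int) :
    ∀ (m : Nat) (r : Int) (base : List (Int × Int × Int × Int)),
      1 ≤ r → (∀ p ∈ base, p.1 < pvCS r) → pvCS r - 1 < maxN → (maxN - pvCS r).toNat ≤ m →
      ∃ rest r',
        pvWhileA maxN (PySem.Dict.mk base) (r - 1) 0 (1 - r) (pvCS r - 1) (r - 1) =
          PySem.Dict.mk (base ++ rest) ∧
        (PySem.List.pyRange (pvCS r) (maxN + 1) 1).foldl pvStepB (PySem.Dict.mk base, r - 1) =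
          (PySem.Dict.mk (base ++ rest), r') := by
  intro m
  induction m using Nat.strong_induction_on with
  | _ m ih =>
  intro r base hr hbase hlt hm
  have hd0 : pvDirGetA 0 = (1, -1, 0) := by decide
  have hsides := pvSidesA_run maxN r hr base hbase 6 0 (by norm_num) (by norm_num)
    (by simp [pvOff]; omega)
  rw [show pvOff r 0 = (0 : Int) from by simp [pvOff]] at hsides
  rw [show ((0 : Int) + 1).toNat = 1 from by norm_num] at hsides
  rw [pvPos_zero r hr] at hsides
  rw [show pvCS r + (0 : Int) = pvCS r from by ring] at hsides
  rw [pvWhileA]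
  rw [dif_pos hlt]
  dsimp only
  rw [hd0]
  rw [show r - 1 + (1 : Int) = r from by ring, show (0 : Int) + (-1) = (-1 : Int) from by ring,
      show 1 - r + (0 : Int) = 1 - r from by ring,
      show pvCS r - 1 + (1 : Int) = pvCS r from by ring]
  rw [pvInsertFresh base (pvCS r) (r, -1, 1 - r) (fun p hp => by have := hbase p hp; omega)]
  rw [show base ++ [(pvCS r, (r, -1, 1 - r))] = base ++ pvSeg r 1 from by
    simp [pvSeg, pvPos_zero r hr]]
  by_cases hfull : pvCS r + 6 * r - 1 ≤ maxN
  · rw [if_pos hfull] at hsides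
    rw [hsides]
    dsimp only
    rw [pvPos_end r hr]
    dsimp only
    by_cases hlt2 : pvCS (r + 1) - 1 < maxN
    · -- another full ring follows
      obtain ⟨rest', r'', hA, hB⟩ := ih ((maxN - pvCS (r + 1)).toNat)
        (by have := pvCS_succ r; omega) (r + 1) (base ++ pvSeg r (6 * r).toNat) (by omega)
        (by intro p hp
            rcases List.mem_append.mp hp with h | h
            · have := hbase p h; have := pvCS_succ r; omega
            · have := pvSeg_mem r _ p h; have := pvCS_succ r; omega)
        hlt2 (le_refl _)
      rw [show (r + 1 : Int) - 1 = r from by ring, show (1 : Int) - (r + 1) = -r from by ring,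
          show pvCS (r + 1) - 1 = pvCS r + 6 * r - 1 from by rw [pvCS_succ]] at hA
      refine ⟨pvSeg r (6 * r).toNat ++ rest', r'', ?_, ?_⟩
      · rw [← List.append_assoc]
        exact hA
      · rw [PySem.List.pyRange_one_append (pvCS r) (pvCS (r + 1)) (maxN + 1)
          (by have := pvCS_succ r; omega) (by omega), List.foldl_append]
        rw [pvB_ring r hr (pvCS (r + 1)) (by have := pvCS_succ r; omega) (le_refl _) base hbase]
        rw [show ((pvCS (r + 1) - pvCS r).toNat) = (6 * r).toNat from by
          have := pvCS_succ r; omega]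
        rw [show (r + 1 - 1 : Int) = r from by ring] at hB
        rw [List.append_assoc] at hB
        exact hB
    · -- the spiral ends exactly with ring r
      have hend : maxN = pvCS r + 6 * r - 1 := by have := pvCS_succ r; omega
      refine ⟨pvSeg r (6 * r).toNat, r, ?_, ?_⟩
      · rw [pvWhileA]
        rw [dif_neg (by omega)]
      · rw [pvB_ring r hr (maxN + 1) (by omega) (by have := pvCS_succ r; omega) base hbase]
        rw [show ((maxN + 1 - pvCS r).toNat) = (6 * r).toNat from by omega]
  · rw [if_neg hfull] at hsides
    rw [hsides]
    dsimp only
    refine ⟨pvSeg r ((maxN - pvCS r).toNat + 1), r, rfl, ?_⟩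
    rw [pvB_ring r hr (maxN + 1) (by omega) (by have := pvCS_succ r; omega) base hbase]
    rw [show ((maxN + 1 - pvCS r).toNat) = (maxN - pvCS r).toNat + 1 from by omega]

-- ===== VERDICT (by name: the statement is the Claim_ definition above) =====
theorem precompute_coords_spec : Claim_equal_precompute_coords := by
  unfold Claim_equal_precompute_coords Spec_precompute_coords
  intro N _
  unfold precompute_coords precompute_coords_alt
  dsimp only
  have hc0 : (PySem.Dict.empty.insert 1 (0, 0, 0) : PySem.Dict Int (Int × Int × Int)) =
      PySem.Dict.mk [(1, (0, 0, 0))] := by decide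
  have hc1 : (PySem.Dict.ofList [(1, (0, 0, 0))] : PySem.Dict Int (Int × Int × Int)) =
      PySem.Dict.mk [(1, (0, 0, 0))] := by decide
  rw [hc0, hc1]
  by_cases hN : N ≤ 1
  · rw [pvWhileA]
    rw [dif_neg (by omega)]
    rw [PySem.List.pyRange_one_eq_nil (by omega)]
    rfl
  · obtain ⟨rest, r', hA, hB⟩ := pvWhileA_run N ((N - pvCS 1).toNat) 1 [(1, (0, 0, 0))]
      (le_refl 1) (by intro p hp; rw [List.mem_singleton] at hp; subst hp; decide)
      (by have : pvCS 1 = 2 := by decide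
          omega)
      (le_refl _)
    rw [show (1 : Int) - 1 = 0 from by norm_num,
        show pvCS 1 - 1 = (1 : Int) from by decide] at hA
    rw [show (1 : Int) - 1 = 0 from by norm_num,
        show pvCS 1 = (2 : Int) from by decide] at hB
    rw [hA, hB]
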